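-- pv_equiv track=rewrite | github.com/AndreaAnguiano/OilSpillForecastSystem | WebGnomeAPI/webgnome_api/common/indexing.py | iter_keywords
-- ===== SOURCE A (Python) =====
-- def iter_keywords(str):
--     lines = str.splitlines()
--     in_tr = False
--     ret = set()
--     for lin in lines:
--         if in_tr:
--             keyword = lin.strip().lower()
--             ret.add(keyword)
--         if "keywords" in lin or "keyword" in lin:
--             in_tr = True
--         else:
--             in_tr = False
--     return ', '.join(sorted(ret))
-- ===== SOURCE B (Python) =====
-- def iter_keywords(str):
--     lines = str.splitlines()
--     ret = {cur.strip().lower()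
--            for prev, cur in zip(lines, lines[1:])
--            if "keyword" in prev}
--     return ', '.join(sorted(ret))
-- ===== Notes on version B (the rewrite author's own statement) =====
-- stated objective: simpler
-- what changed: Replaces the carried in_tr boolean state machine with a direct lookahead over consecutive line pairs (zip(lines, lines[1:])), collecting cur for each pair whose prev contains 'keyword' (which also subsumes the redundant 'keywords' test) in a set comprehension.
import Mathlib
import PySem

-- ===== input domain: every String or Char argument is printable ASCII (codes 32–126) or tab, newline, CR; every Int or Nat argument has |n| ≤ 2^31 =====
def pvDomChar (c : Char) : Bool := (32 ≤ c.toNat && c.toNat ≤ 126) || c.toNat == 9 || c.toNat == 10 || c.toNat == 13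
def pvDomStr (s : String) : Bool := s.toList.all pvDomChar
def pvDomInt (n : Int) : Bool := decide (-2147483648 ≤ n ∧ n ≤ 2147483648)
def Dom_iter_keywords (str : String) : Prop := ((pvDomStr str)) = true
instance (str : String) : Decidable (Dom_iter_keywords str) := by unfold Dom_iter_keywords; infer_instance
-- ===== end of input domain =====

-- B replaces A's carried in_tr flag with a direct lookahead over consecutive line pairs (simpler decomposition, same cost).

-- ===== PORT A =====
def iter_keywords (str : String) : String :=
  let lines := PySem.Str.splitlines str
  let st := lines.foldl
    (fun (acc : Bool × PySem.Set String) lin =>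
      let ret := if acc.1 then PySem.Set.add acc.2 (PySem.Str.lower (PySem.Str.strip lin)) else acc.2
      let in_tr := PySem.Str.isIn "keywords" lin || PySem.Str.isIn "keyword" lin
      (in_tr, ret))
    (false, PySem.Set.empty)
  PySem.Str.join ", " (PySem.List.sorted st.2 (fun x => x) false)

-- ===== PORT B =====
def iter_keywords_alt (str : String) : String :=
  let lines := PySem.Str.splitlines str
  let cands := ((lines.zip (lines.drop 1)).filter
      (fun p => PySem.Str.isIn "keyword" p.1)).map
      (fun p => PySem.Str.lower (PySem.Str.strip p.2))
  PySem.Str.join ", " (PySem.List.sorted (PySem.Set.ofList cands) (fun x => x) false)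

-- ===== PRECONDITION & SPEC =====
def Spec_iter_keywords (str : String) (out : String) : Prop := out = iter_keywords_alt str
instance (str : String) (out : String) : Decidable (Spec_iter_keywords str out) := by unfold Spec_iter_keywords; infer_instance

-- ===== CLAIM (what is proved, stated in full; the proofs are below) =====
def Claim_equal_iter_keywords : Prop := ∀ (str : String), Dom_iter_keywords str → Spec_iter_keywords str (iter_keywords str)

-- ===== LEMMAS AND PROOFS =====

-- abbreviations for the two programs' pieces (proof-side only)
def pvProc (lin : String) : String := PySem.Str.lower (PySem.Str.strip lin)
def pvHasKW (lin : String) : Bool := PySem.Str.isIn "keywords" lin || PySem.Str.isIn "keyword" lin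

-- the pending-flag candidate stream of A's loop
def pvCand (b : Bool) : List String → List String
  | [] => []
  | l :: ls => (if b then [pvProc l] else []) ++ pvCand (pvHasKW l) ls

-- B's candidate stream
def pvBCand (lines : List String) : List String :=
  ((lines.zip (lines.drop 1)).filter (fun p => PySem.Str.isIn "keyword" p.1)).map (fun p => pvProc p.2)

-- 'keywords' in l implies 'keyword' in l, so A's two-way test equals B's single test
theorem pvHasKW_eq (l : String) : pvHasKW l = PySem.Str.isIn "keyword" l := by
  unfold pvHasKW
  cases hk : PySem.Str.isIn "keyword" l
  · cases hks : PySem.Str.isIn "keywords" l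
    · simp
    · exfalso
      have h1 : ("keywords".toList) <:+: l.toList := by
        have := hks; simp only [PySem.Str.isIn_eq] at this
        exact (PySem.Chars.isIn_iff_infix _ _).mp this
      have h2 : ("keyword".toList) <:+: ("keywords".toList) := by decide
      have h3 : ("keyword".toList) <:+: l.toList := h2.trans h1
      have : PySem.Chars.isIn ("keyword".toList) l.toList = true :=
        (PySem.Chars.isIn_iff_infix _ _).mpr h3
      simp only [PySem.Str.isIn_eq] at hk
      rw [hk] at this; exact Bool.false_ne_true this
  · simp

-- A's loop accumulates exactly the pvCand stream into the set
theorem pvLoopA (lines : List String) : ∀ (b : Bool) (s : PySem.Set String),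
    (lines.foldl
      (fun (acc : Bool × PySem.Set String) lin =>
        let ret := if acc.1 then PySem.Set.add acc.2 (PySem.Str.lower (PySem.Str.strip lin)) else acc.2
        let in_tr := PySem.Str.isIn "keywords" lin || PySem.Str.isIn "keyword" lin
        (in_tr, ret))
      (b, s)).2 = PySem.Set.update s (pvCand b lines) := by
  induction lines with
  | nil => intro b s; simp [pvCand, PySem.Set.update_nil]
  | cons l ls ih =>
    intro b s
    simp only [List.foldl_cons]
    rw [ih]
    have h : pvCand b (l :: ls) =
        (if b then [pvProc l] else []) ++
          pvCand (PySem.Str.isIn "keywords" l || PySem.Str.isIn "keyword" l) ls := by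
      cases b <;> rfl
    rw [h, PySem.Set.update_append]
    congr 1
    cases b with
    | false => simp [PySem.Set.update_nil]
    | true => simp [PySem.Set.update_cons, PySem.Set.update_nil, pvProc]

-- pending-flag stream with the flag of a preceding line = B's pair stream
theorem pvCand_eq_aux (ls : List String) : ∀ (l : String),
    pvCand (pvHasKW l) ls = pvBCand (l :: ls) := by
  induction ls with
  | nil => intro l; simp [pvCand, pvBCand]
  | cons l2 rest ih =>
    intro l
    unfold pvCand pvBCand
    simp only [List.drop_succ_cons, List.drop_zero, List.zip_cons_cons, List.filter_cons]
    rw [pvHasKW_eq l]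
    cases hk : PySem.Str.isIn "keyword" l
    · simpa using (ih l2)
    · have := ih l2
      unfold pvBCand at this
      simp only [List.drop_succ_cons, List.drop_zero] at this
      simp [this]

theorem pvCand_eq (lines : List String) : pvCand false lines = pvBCand lines := by
  cases lines with
  | nil => simp [pvCand, pvBCand]
  | cons l ls =>
    unfold pvCand
    simp only [if_neg (by simp : ¬ (false = true)), List.nil_append]
    exact pvCand_eq_aux ls l

-- ===== VERDICT (by name: the statement is the Claim_ definition above) =====
theorem iter_keywords_spec : Claim_equal_iter_keywords := by
  intro str _
  unfold Spec_iter_keywords iter_keywords iter_keywords_alt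
  simp only []
  rw [pvLoopA]
  rw [pvCand_eq]
  rw [PySem.Set.update_empty]
  unfold pvBCand pvProc
  rfl
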